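-- pv_equiv track=rewrite | github.com/pypi-data/pypi-mirror-86 | packages/appname-generator/appname_generator-0.1.1-py3-none-any.whl/appname_generator/generator/utils.py | max_siblings_vowels
-- ===== SOURCE A (Python) =====
-- CONSONANTS = "BCDFGHJKLMNPQRSTVWXZ"
--
-- def max_siblings_vowels(word, n):
--         counter = 0
--         for l in word:
--             if l not in CONSONANTS:
--                 counter += 1
--             else:
--                 counter = 0
--             if counter > n:
--                 return False
--         return True
-- ===== SOURCE B (Python) =====
-- CONSONANTS = "BCDFGHJKLMNPQRSTVWXZ"
--
-- def max_siblings_vowels(word, n):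
--     # Scan the word by maximal runs of vowels (non-consonants): skip
--     # consonants, measure each vowel run with a second index, and fail
--     # if any run is longer than n.
--     i = 0
--     while i < len(word):
--         if word[i] in CONSONANTS:
--             i += 1
--         else:
--             j = i
--             while j < len(word) and word[j] not in CONSONANTS:
--                 j += 1
--             if j - i > n:
--                 return False
--             i = j
--     return True
-- ===== Notes on version B (the rewrite author's own statement) =====
-- stated objective: alternative
-- what changed: B scans the word by maximal vowel runs with a two-index skip/measure loop and compares each whole run length against n, instead of A's per-character counter that is reset and re-checked on every consonant.
-- intended difference: On nonempty words made only of the uppercase consonants with n < 0, A returns False because it compares its reset counter (0) against n at consonant positions, while B returns True because the word contains no vowel run at all; B's is the intended answer to 'no vowel run longer than n'. — e.g. on max_siblings_vowels("B", -1): A returns false, B returns true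
import Mathlib
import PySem

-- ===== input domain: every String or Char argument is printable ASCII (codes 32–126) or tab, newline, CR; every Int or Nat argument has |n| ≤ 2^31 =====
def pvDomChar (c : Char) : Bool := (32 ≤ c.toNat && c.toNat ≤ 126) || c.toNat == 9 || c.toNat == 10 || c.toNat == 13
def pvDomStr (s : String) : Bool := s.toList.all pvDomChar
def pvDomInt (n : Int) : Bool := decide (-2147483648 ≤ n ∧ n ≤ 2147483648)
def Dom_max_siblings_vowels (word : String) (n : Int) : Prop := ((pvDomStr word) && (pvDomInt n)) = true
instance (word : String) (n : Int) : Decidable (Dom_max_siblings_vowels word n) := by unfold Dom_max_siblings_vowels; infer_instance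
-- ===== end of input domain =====

-- B scans the word by maximal vowel runs (two-index skip/measure) instead of A's reset counter (alternative decomposition, same cost).


-- ===== PORT A =====
def pvCONSONANTS : String := "BCDFGHJKLMNPQRSTVWXZ"

-- `l in CONSONANTS` for a single char = char membership in the constant
def pvIsCons (l : Char) : Bool := pvCONSONANTS.toList.contains l

-- the for-loop of A: state = counter, early return on counter > n
def pvGoA (n : Int) : List Char → Int → Bool
  | [], _ => true
  | l :: ls, counter =>
    let counter' : Int := if !pvIsCons l then counter + 1 else 0
    if counter' > n then false else pvGoA n ls counter'

def max_siblings_vowels (word : String) (n : Int) : Bool :=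
  pvGoA n word.toList 0

-- ===== PORT B =====
-- the outer while of Source B over the suffix word[i:]: a consonant head is
-- skipped (i += 1); at a vowel head the inner while (= takeWhile over the
-- vowels) measures the run word[i:j], and on success the loop resumes at j
-- (= dropWhile of the vowels)
def pvGoB (n : Int) : List Char → Bool
  | [] => true
  | c :: cs =>
    if pvIsCons c then pvGoB n cs
    else
      let g := cs.takeWhile (fun x => !pvIsCons x)
      if (1 + (g.length : Int)) > n then false
      else pvGoB n (cs.dropWhile (fun x => !pvIsCons x))
  termination_by l => l.length
  decreasing_by
    · simp
    · simp only [List.length_cons]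
      exact Nat.lt_succ_of_le (List.length_dropWhile_le ..)

def max_siblings_vowels_alt (word : String) (n : Int) : Bool :=
  pvGoB n word.toList

-- ===== PRECONDITION & SPEC =====
-- On nonempty words made only of the uppercase consonants with n < 0, A returns
-- False because it compares its reset counter (0) against n at consonant
-- positions, while B returns True because the word contains no vowel run at
-- all; B's is the intended answer to "no vowel run longer than n".
def D_max_siblings_vowels (word : String) (n : Int) : Prop :=
  n < 0 ∧ word ≠ "" ∧ word.toList.all pvIsCons = true
instance (word : String) (n : Int) : Decidable (D_max_siblings_vowels word n) := by unfold D_max_siblings_vowels; infer_instance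

def Spec_max_siblings_vowels (word : String) (n : Int) (out : Bool) : Prop :=
  ¬ D_max_siblings_vowels word n → out = max_siblings_vowels_alt word n
instance (word : String) (n : Int) (out : Bool) : Decidable (Spec_max_siblings_vowels word n out) := by unfold Spec_max_siblings_vowels; infer_instance

def pvDiffWitness_max_siblings_vowels : String × Int := ("B", -1)
def pvDiffWitnessOut_max_siblings_vowels : Bool × Bool := (false, true)

-- ===== CLAIM (what is proved, stated in full; the proofs are below) =====
def Claim_unchanged_max_siblings_vowels : Prop := ∀ (word : String) (n : Int), Dom_max_siblings_vowels word n → Spec_max_siblings_vowels word n (max_siblings_vowels word n)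
def Claim_changed_max_siblings_vowels : Prop := Dom_max_siblings_vowels (pvDiffWitness_max_siblings_vowels.1) (pvDiffWitness_max_siblings_vowels.2) ∧ D_max_siblings_vowels (pvDiffWitness_max_siblings_vowels.1) (pvDiffWitness_max_siblings_vowels.2) ∧ max_siblings_vowels (pvDiffWitness_max_siblings_vowels.1) (pvDiffWitness_max_siblings_vowels.2) = pvDiffWitnessOut_max_siblings_vowels.1 ∧ max_siblings_vowels_alt (pvDiffWitness_max_siblings_vowels.1) (pvDiffWitness_max_siblings_vowels.2) = pvDiffWitnessOut_max_siblings_vowels.2 ∧ pvDiffWitnessOut_max_siblings_vowels.1 ≠ pvDiffWitnessOut_max_siblings_vowels.2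
def Claim_exact_max_siblings_vowels : Prop := ∀ (word : String) (n : Int), Dom_max_siblings_vowels word n → D_max_siblings_vowels word n → max_siblings_vowels word n ≠ max_siblings_vowels_alt word n

-- ===== LEMMAS AND PROOFS =====

theorem pvGoB_nil (n : Int) : pvGoB n [] = true := by rw [pvGoB]

theorem pvGoB_cons (n : Int) (c : Char) (cs : List Char) :
    pvGoB n (c :: cs)
      = (if pvIsCons c then pvGoB n cs
         else if (1 + ((cs.takeWhile (fun x => !pvIsCons x)).length : Int)) > n then false
         else pvGoB n (cs.dropWhile (fun x => !pvIsCons x))) := by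
  rw [pvGoB]

-- one step of A at a vowel
theorem pvGoA_step_vowel (n : Int) (x : Char) (hx : pvIsCons x = false)
    (xs : List Char) (k : Int) :
    pvGoA n (x :: xs) k = if k + 1 > n then false else pvGoA n xs (k + 1) := by
  simp only [pvGoA, hx, Bool.not_false, reduceIte]

-- one step of A at a consonant: the counter is reset to 0 and 0 > n is checked
theorem pvGoA_step_cons (n : Int) (x : Char) (hx : pvIsCons x = true)
    (xs : List Char) (k : Int) :
    pvGoA n (x :: xs) k = if (0 : Int) > n then false else pvGoA n xs 0 := by
  simp only [pvGoA, hx, Bool.not_true]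
  norm_num

-- A on a nonempty run of vowels: the counter climbs monotonically, so the early
-- return inside the run fires iff the end-of-run counter exceeds n
theorem pvGoA_vowel_run (n : Int) :
    ∀ (g : List Char) (c : Char), (∀ x ∈ c :: g, pvIsCons x = false) →
      ∀ (rest : List Char) (counter : Int),
        pvGoA n ((c :: g) ++ rest) counter
          = if counter + 1 + g.length > n then false
            else pvGoA n rest (counter + 1 + g.length) := by
  intro g
  induction g with
  | nil =>
    intro c h rest counter
    rw [List.singleton_append, pvGoA_step_vowel n c (h c (by simp)) rest counter]
    simp
  | cons d t ih =>
    intro c h rest counter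
    have hc : pvIsCons c = false := h c (by simp)
    have hdt : ∀ x ∈ d :: t, pvIsCons x = false := fun x hx => h x (by simp at hx ⊢; tauto)
    rw [List.cons_append, pvGoA_step_vowel n c hc _ counter, ih d hdt rest (counter + 1)]
    have hlen : ((d :: t).length : Int) = 1 + (t.length : Int) := by
      simp only [List.length_cons]; push_cast; omega
    split_ifs with h1 h2 h3 h3 <;> first
      | rfl
      | (exfalso; rw [hlen] at *; omega)
      | (congr 1; rw [hlen] at *; omega)

-- when the tail starts with a consonant (or is empty), A's result does not
-- depend on the incoming counter
theorem pvGoA_counter_irrel (n : Int) (rest : List Char)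
    (h : ∀ r rs, rest = r :: rs → pvIsCons r = true) (counter : Int) :
    pvGoA n rest counter = pvGoA n rest 0 := by
  rcases rest with _ | ⟨r, rs⟩
  · rfl
  · rw [pvGoA_step_cons n r (h r rs rfl) rs counter, pvGoA_step_cons n r (h r rs rfl) rs 0]

-- n < 0: A fails at the very first character
theorem pvGoA_neg (n : Int) (hn : n < 0) (c : Char) (cs : List Char) :
    pvGoA n (c :: cs) 0 = false := by
  by_cases hc : pvIsCons c
  · rw [pvGoA_step_cons n c hc cs 0]; simp [hn]
  · rw [pvGoA_step_vowel n c (by simpa using hc) cs 0]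
    have h01 : (0 : Int) + 1 > n := by omega
    rw [if_pos h01]

-- n < 0: B fails iff a vowel occurs
theorem pvGoB_neg (n : Int) (hn : n < 0) :
    ∀ (l : List Char) (c : Char), c ∈ l → pvIsCons c = false → pvGoB n l = false := by
  intro l
  induction l with
  | nil => intro c hc; simp at hc
  | cons d t ih =>
    intro c hc hv
    rw [pvGoB_cons]
    by_cases hd : pvIsCons d
    · simp only [hd, if_true]
      rcases List.mem_cons.mp hc with h | h
      · rw [h] at hv; rw [hv] at hd; exact absurd hd (by simp)
      · exact ih c h hv
    · have h1 : (1 : Int) + ((t.takeWhile (fun x => !pvIsCons x)).length : Int) > n := by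
        have : (0 : Int) ≤ ((t.takeWhile (fun x => !pvIsCons x)).length : Int) := Int.natCast_nonneg _
        omega
      simp [hd, h1]

-- all-consonant words: B succeeds (no vowel run exists)
theorem pvGoB_all_cons (n : Int) :
    ∀ (l : List Char), l.all pvIsCons = true → pvGoB n l = true := by
  intro l
  induction l with
  | nil => exact fun _ => pvGoB_nil n
  | cons d t ih =>
    intro h
    simp only [List.all_cons, Bool.and_eq_true] at h
    rw [pvGoB_cons]
    simp [h.1, ih h.2]

-- the main equivalence on n ≥ 0
theorem pvGoA_eq_pvGoB (n : Int) (hn : 0 ≤ n) (l : List Char) :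
    pvGoA n l 0 = pvGoB n l := by
  rcases hl : l with _ | ⟨c, cs⟩
  · rw [pvGoB_nil]; rfl
  · by_cases hk : pvIsCons c
    · -- consonant head: A resets to 0 and (0 > n) is false; B skips it
      rw [pvGoA_step_cons n c hk cs 0, pvGoB_cons]
      have h0 : ¬ ((0 : Int) > n) := by omega
      simp only [h0, if_false, hk, if_true]
      exact pvGoA_eq_pvGoB n hn cs
    · -- vowel head: the maximal vowel run is c :: takeWhile
      have hkf : pvIsCons c = false := by simpa using hk
      have hsplit := List.takeWhile_append_dropWhile (p := fun x => !pvIsCons x) (l := cs)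
      set g := cs.takeWhile (fun x => !pvIsCons x) with hg
      set rest := cs.dropWhile (fun x => !pvIsCons x) with hrest
      have hall : ∀ x ∈ c :: g, pvIsCons x = false := by
        intro x hx
        rcases List.mem_cons.mp hx with h | h
        · rw [h]; exact hkf
        · simpa using List.mem_takeWhile_imp h
      have hresthead : ∀ r rs, rest = r :: rs → pvIsCons r = true := by
        intro r rs hr
        have hne : rest ≠ [] := by simp [hr]
        have := List.head_dropWhile_not (fun x => !pvIsCons x) (l := cs)
          (by rw [← hrest]; exact hne)
        simp only [← hrest, hr, List.head_cons] at this
        simpa using this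
      have hcons : c :: cs = (c :: g) ++ rest := by rw [List.cons_append, hsplit]
      conv_lhs => rw [hcons]
      rw [pvGoA_vowel_run n g c hall rest 0,
        pvGoA_counter_irrel n rest hresthead, pvGoB_cons, ← hg, ← hrest,
        pvGoA_eq_pvGoB n hn rest]
      have h01 : (0 : Int) + 1 + (g.length : Int) = 1 + (g.length : Int) := by omega
      rw [h01]
      simp [hkf]
  termination_by l.length
  decreasing_by
    · simp
    · simp only [List.length_cons]
      exact Nat.lt_succ_of_le (List.length_dropWhile_le ..)

-- ===== VERDICT (by name: the statements are the Claim_ definitions above) =====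
theorem max_siblings_vowels_spec : Claim_unchanged_max_siblings_vowels := by
  intro word n _ hD
  unfold max_siblings_vowels max_siblings_vowels_alt
  by_cases hn : 0 ≤ n
  · exact pvGoA_eq_pvGoB n hn word.toList
  · have hn' : n < 0 := by omega
    rcases hl : word.toList with _ | ⟨c, cs⟩
    · rw [pvGoB_nil]; rfl
    · have hne : word ≠ "" := by
        intro h; rw [h] at hl; simp at hl
      have hvow : ¬ (word.toList.all pvIsCons = true) := by
        intro hall
        exact hD ⟨hn', hne, hall⟩
      rw [hl] at hvow
      simp only [List.all_eq_true, not_forall] at hvow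
      obtain ⟨x, hx, hxc⟩ := hvow
      rw [pvGoA_neg n hn' c cs,
        pvGoB_neg n hn' (c :: cs) x hx (by simpa using hxc)]

theorem max_siblings_vowels_changed : Claim_changed_max_siblings_vowels := by
  unfold Claim_changed_max_siblings_vowels
  refine ⟨by decide, by decide, by decide, ?_, by decide⟩
  show max_siblings_vowels_alt "B" (-1) = true
  unfold max_siblings_vowels_alt
  have hl : ("B" : String).toList = ['B'] := by decide
  rw [hl, pvGoB_cons]
  simp [show pvIsCons 'B' = true from by decide, pvGoB_nil]

theorem max_siblings_vowels_tight : Claim_exact_max_siblings_vowels := by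
  intro word n _ hD
  obtain ⟨hn, hne, hall⟩ := hD
  unfold max_siblings_vowels max_siblings_vowels_alt
  rcases hl : word.toList with _ | ⟨c, cs⟩
  · exact absurd (String.toList_eq_nil_iff.mp hl) hne
  · rw [pvGoA_neg n hn c cs, pvGoB_all_cons n (c :: cs) (hl ▸ hall)]
    simp
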